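-- pv_equiv track=rewrite | github.com/vltanh/k-densest-neighborhood | scripts/classification/split_utils.py | argmax_label_value
-- ===== SOURCE A (Python) =====
-- from collections import Counter, defaultdict
--
-- def argmax_label_value(counter: Counter):
--     """Deterministic argmax over label counts; ties broken by ascending label."""
--     if not counter:
--         return None
--     best = None
--     for label, count in counter.items():
--         key = (-count, label)
--         if best is None or key < best[0]:
--             best = (key, label)
--     return best[1]
-- ===== SOURCE B (Python) =====
-- def argmax_label_value(counter):
--     """Deterministic argmax over label counts; ties broken by ascending label."""
--     if not counter:
--         return None
--     ranked = sorted(counter.items(), key=lambda kv: (-kv[1], kv[0]))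
--     return ranked[0][0]
-- ===== Notes on version B (the rewrite author's own statement) =====
-- stated objective: simpler
-- what changed: Replaced the explicit single-pass argmax loop with an Option accumulator by sorting the (label,count) pairs with key (-count,label) and taking the first element.
import Mathlib
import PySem

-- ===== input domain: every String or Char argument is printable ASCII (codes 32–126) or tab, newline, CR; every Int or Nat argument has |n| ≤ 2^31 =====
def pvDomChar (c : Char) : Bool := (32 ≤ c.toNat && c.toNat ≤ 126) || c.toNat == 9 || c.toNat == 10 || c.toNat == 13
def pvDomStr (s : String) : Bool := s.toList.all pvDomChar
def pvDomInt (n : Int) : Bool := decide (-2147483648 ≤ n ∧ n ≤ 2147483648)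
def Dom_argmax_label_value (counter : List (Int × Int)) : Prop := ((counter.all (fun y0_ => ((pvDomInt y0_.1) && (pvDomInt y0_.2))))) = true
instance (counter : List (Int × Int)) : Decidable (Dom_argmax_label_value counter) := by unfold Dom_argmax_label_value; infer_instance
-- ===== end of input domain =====

-- B replaces A's explicit single-pass argmax loop by sort-with-key-(-count,label)-then-take-first; objective: simpler.


-- ===== PORT A =====
-- Python tuple '<' on (Int, Int): lexicographic (exact for 2-tuples of ints).
def pyTupLt (a b : Int × Int) : Bool := decide (a.1 < b.1) || (decide (a.1 = b.1) && decide (a.2 < b.2))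

def argmax_label_value (counter : List (Int × Int)) : Option Int :=
  if counter = [] then none
  else
    let best : Option ((Int × Int) × Int) :=
      counter.foldl
        (fun best lc =>
          let key : Int × Int := (-lc.2, lc.1)
          match best with
          | none => some (key, lc.1)
          | some b => if pyTupLt key b.1 then some (key, lc.1) else some b)
        none
    match best with
    | some b => some b.2
    | none => none   -- unreachable: counter ≠ [] guarantees best is set

-- ===== PORT B =====
def argmax_label_value_alt (counter : List (Int × Int)) : Option Int :=
  if counter = [] then none
  else
    match PySem.List.sorted2 counter (fun kv => -kv.2) (fun kv => kv.1) with
    | p :: _ => some p.1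
    | [] => none   -- unreachable: sorted of a nonempty list is nonempty

-- ===== PRECONDITION & SPEC =====
def Spec_argmax_label_value (counter : List (Int × Int)) (out : Option Int) : Prop := out = argmax_label_value_alt counter
instance (counter : List (Int × Int)) (out : Option Int) : Decidable (Spec_argmax_label_value counter out) := by unfold Spec_argmax_label_value; infer_instance

-- ===== CLAIM (what is proved, stated in full; the proofs are below) =====
def Claim_equal_argmax_label_value : Prop := ∀ (counter : List (Int × Int)), Dom_argmax_label_value counter → Spec_argmax_label_value counter (argmax_label_value counter)

-- ===== LEMMAS AND PROOFS =====

-- the key both programs compare by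
def pvKey (p : Int × Int) : Int × Int := (-p.2, p.1)

-- strict "better than" used by both sides
def pvLt (a b : Int × Int) : Bool := pyTupLt (pvKey a) (pvKey b)

-- A's loop body, named for the proofs (definitionally the lambda in the port)
def pvStepA (best : Option ((Int × Int) × Int)) (lc : Int × Int) : Option ((Int × Int) × Int) :=
  let key : Int × Int := (-lc.2, lc.1)
  match best with
  | none => some (key, lc.1)
  | some b => if pyTupLt key b.1 then some (key, lc.1) else some b

-- running first-minimum under pvLt
def pvRunMin (xs : List (Int × Int)) (p : Int × Int) : Int × Int :=
  xs.foldl (fun c x => if pvLt x c then x else c) p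

theorem pvRunMin_cons (x : Int × Int) (t : List (Int × Int)) (p : Int × Int) :
    pvRunMin (x :: t) p = pvRunMin t (if pvLt x p then x else p) := rfl

-- sorted2's boolean comparator coincides with pvLt on a linear order
theorem pv_before_eq :
    (fun a b : Int × Int =>
        decide ((fun kv : Int × Int => -kv.2) a < (fun kv : Int × Int => -kv.2) b) ||
          (!decide ((fun kv : Int × Int => -kv.2) b < (fun kv : Int × Int => -kv.2) a) &&
            decide ((fun kv : Int × Int => kv.1) a < (fun kv : Int × Int => kv.1) b)))
      = pvLt := by
  funext a b
  simp only [pvLt, pyTupLt, pvKey]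
  by_cases h1 : -a.2 < -b.2
  · simp [h1]
  · by_cases h2 : -b.2 < -a.2
    · simp [h1, h2, show ¬(-a.2 = -b.2) by omega]
    · simp [show -a.2 = -b.2 by omega]

-- A's loop, once the accumulator is set, computes the running first-minimum
theorem pv_foldA (xs : List (Int × Int)) (p : Int × Int) :
    xs.foldl pvStepA (some (pvKey p, p.1))
      = some (pvKey (pvRunMin xs p), (pvRunMin xs p).1) := by
  induction xs generalizing p with
  | nil => rfl
  | cons x t ih =>
    rw [List.foldl_cons, pvRunMin_cons]
    have hstep : pvStepA (some (pvKey p, p.1)) x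
        = some (pvKey (if pvLt x p then x else p), (if pvLt x p then x else p).1) := by
      by_cases h : pvLt x p = true <;>
        · simp only [pvLt, pvKey] at h
          simp [pvStepA, pvLt, pvKey, h]
    rw [hstep]
    exact ih _

-- the head of an insertion-sort fold seeded with a nonempty list is the running first-minimum of its head
theorem pv_foldB (xs : List (Int × Int)) (m : Int × Int) (rest : List (Int × Int)) :
    (xs.foldl (fun acc x => PySem.List.insertBy pvLt x acc) (m :: rest)).head?
      = some (pvRunMin xs m) := by
  induction xs generalizing m rest with
  | nil => simp [pvRunMin]
  | cons x t ih =>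
    rw [List.foldl_cons, pvRunMin_cons]
    simp only [PySem.List.insertBy]
    by_cases h : pvLt x m = true
    · simpa [h] using ih x (m :: rest)
    · simpa [h] using ih m (PySem.List.insertBy pvLt x rest)

-- ===== VERDICT (by name: the statement is the Claim_ definition above) =====
theorem argmax_label_value_spec : Claim_equal_argmax_label_value := by
  intro counter _
  unfold Spec_argmax_label_value argmax_label_value argmax_label_value_alt
  cases counter with
  | nil => rfl
  | cons x t =>
    simp only [if_neg (List.cons_ne_nil x t), PySem.List.sorted2, Bool.false_eq_true, if_false, pv_before_eq,
      List.foldl_cons, PySem.List.insertBy]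
    rw [show (t.foldl
        (fun best lc =>
          let key : Int × Int := (-lc.2, lc.1)
          match best with
          | none => some (key, lc.1)
          | some b => if pyTupLt key b.1 then some (key, lc.1) else some b)
        (some ((-x.2, x.1), x.1))) = t.foldl pvStepA (some (pvKey x, x.1)) from rfl,
      pv_foldA]
    have hB := pv_foldB t x []
    cases hsort : t.foldl (fun acc x => PySem.List.insertBy pvLt x acc) [x] with
    | nil => simp [hsort] at hB
    | cons p rest =>
      rw [hsort] at hB
      simp only [List.head?_cons, Option.some.injEq] at hB
      simp [← hB]
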